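-- pv_equiv track=rewrite | github.com/boboPD/MCS-MPs | CS412/Seq Pattern Mining/prefixspan.py | mine_proj_db
-- ===== SOURCE A (Python) =====
-- def mine_proj_db(db, index_list, prefix, minsup):
--     item_positions = {}
--     item_counts = {}
--     prev_row = -1
--     distinct_words_in_row = set()
--     for row, col in index_list:
--         if row >= len(db) or col >=  len(db[row]):
--             continue
--         word = db[row][col]
--
--         if row != prev_row:
--             distinct_words_in_row.clear()
--             prev_row = row
--
--         if word not in distinct_words_in_row:
--             distinct_words_in_row.add(word)
--             if word not in item_counts:
--                 item_counts[word] = 1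
--             else:
--                 item_counts[word] = item_counts[word] + 1
--
--         if word not in item_positions:
--             item_positions[word] = [(row, col)]
--         else:
--             item_positions[word].append((row, col))
--
--     freq_items = {f"{prefix};{item}": (item_positions[item], item_counts[item]) for item in item_counts if item_counts[item] >= minsup}
--     return freq_items
-- ===== SOURCE B (Python) =====
-- def mine_proj_db(db, index_list, prefix, minsup):
--     # Stage 1: annotate each valid occurrence with a run id: maximal blocks of
--     # equal row in the valid stream share one id, ids increase at each boundary.
--     ann = []                       # (run_id, word, (row, col))
--     for r, c in index_list:
--         if r >= len(db) or c >= len(db[r]):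
--             continue
--         rid = ann[-1][0] + (r != ann[-1][2][0]) if ann else 0
--         ann.append((rid, db[r][c], (r, c)))
--
--     # Stage 2: per distinct word (first-occurrence order), the support is the
--     # number of distinct run ids it occurs under; positions are its occurrences.
--     out = {}
--     for w in dict.fromkeys(t[1] for t in ann):
--         support = len({rid for rid, w2, _ in ann if w2 == w})
--         if support >= minsup:
--             out[f"{prefix};{w}"] = ([p for rid, w2, p in ann if w2 == w], support)
--     return out
-- ===== Notes on version B (the rewrite author's own statement) =====
-- stated objective: alternative
-- what changed: B abandons A's single streaming pass with mutable position/count dicts and a per-row seen-set: it first annotates each valid occurrence with an explicit run id (incremented at every row boundary), and then, for each distinct word in first-occurrence order, computes the support as the cardinality of the set of run ids under which the word occurs and its positions by filtering the annotated stream.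
import Mathlib
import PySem

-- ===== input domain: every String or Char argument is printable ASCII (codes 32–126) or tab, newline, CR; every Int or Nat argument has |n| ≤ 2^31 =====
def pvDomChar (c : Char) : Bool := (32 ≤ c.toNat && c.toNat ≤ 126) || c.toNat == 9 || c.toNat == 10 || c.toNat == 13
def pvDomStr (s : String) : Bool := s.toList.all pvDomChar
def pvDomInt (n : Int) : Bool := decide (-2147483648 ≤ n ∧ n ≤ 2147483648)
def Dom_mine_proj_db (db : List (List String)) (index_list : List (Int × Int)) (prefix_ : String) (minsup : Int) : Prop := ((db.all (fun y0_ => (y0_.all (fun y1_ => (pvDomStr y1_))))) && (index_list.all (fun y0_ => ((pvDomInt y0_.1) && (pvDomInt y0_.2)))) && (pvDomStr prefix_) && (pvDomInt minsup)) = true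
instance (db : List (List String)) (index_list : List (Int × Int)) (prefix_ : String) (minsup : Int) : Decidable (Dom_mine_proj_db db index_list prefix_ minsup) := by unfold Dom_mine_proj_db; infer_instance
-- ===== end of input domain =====

-- B replaces A's single streaming pass (mutable position/count dicts plus a per-row seen-set)
-- by a two-stage algorithm: annotate each valid occurrence with an explicit run id, then for
-- each distinct word count the distinct run ids it occurs under (objective: alternative).

-- ===== PORT A =====
-- One iteration of A's for-loop over (row, col); state = (item_positions, item_counts, prev_row, distinct_words_in_row).
def pvAStep (db : List (List String))
    (st : PySem.Dict String (List (Int × Int)) × PySem.Dict String Int × Int × PySem.Set String)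
    (rc : Int × Int) :
    PySem.Dict String (List (Int × Int)) × PySem.Dict String Int × Int × PySem.Set String :=
  if (db.length : Int) ≤ rc.1 then st else
  match PySem.List.pyGet? db rc.1 with
  | none => st      -- Python raises IndexError here; such inputs are excluded by Pre_
  | some rowL =>
    if (rowL.length : Int) ≤ rc.2 then st else
    match PySem.List.pyGet? rowL rc.2 with
    | none => st    -- Python raises IndexError here; such inputs are excluded by Pre_
    | some word =>
      let pos := st.1
      let cnt := st.2.1
      let prev := st.2.2.1
      let seen := st.2.2.2
      let prev' : Int := if rc.1 ≠ prev then rc.1 else prev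
      let seen' : PySem.Set String := if rc.1 ≠ prev then PySem.Set.empty else seen
      let cnt' := if PySem.Set.contains seen' word then cnt
        else if cnt.contains word then cnt.insert word (cnt.getD word 0 + 1)
        else cnt.insert word 1
      let seen'' := if PySem.Set.contains seen' word then seen' else PySem.Set.add seen' word
      let pos' := if pos.contains word then pos.modify word [] (· ++ [(rc.1, rc.2)])
                  else pos.insert word [(rc.1, rc.2)]
      (pos', cnt', prev', seen'')

def mine_proj_db (db : List (List String)) (index_list : List (Int × Int)) (prefix_ : String) (minsup : Int) : List (String × (List (Int × Int)) × Int) :=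
  let st := index_list.foldl (pvAStep db) (PySem.Dict.empty, PySem.Dict.empty, -1, PySem.Set.empty)
  -- {f"{prefix};{item}": (item_positions[item], item_counts[item]) for item in item_counts if item_counts[item] >= minsup}
  -- item_positions[item] never raises (every counted word has a position); ported as getD.
  ((PySem.Dict.keys st.2.1).filter (fun w => minsup ≤ st.2.1.getD w 0)).map
    (fun w => (prefix_ ++ ";" ++ w, (st.1.getD w [], st.2.1.getD w 0)))

-- ===== PORT B =====
-- Stage 1 loop body: append (run_id, word, (row, col)); run id read off ann[-1].
def pvAnnStep (db : List (List String))
    (ann : List (Int × String × (Int × Int))) (rc : Int × Int) :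
    List (Int × String × (Int × Int)) :=
  if (db.length : Int) ≤ rc.1 then ann else
  match PySem.List.pyGet? db rc.1 with
  | none => ann     -- Python raises IndexError here; such inputs are excluded by Pre_
  | some rowL =>
    if (rowL.length : Int) ≤ rc.2 then ann else
    match PySem.List.pyGet? rowL rc.2 with
    | none => ann   -- Python raises IndexError here; such inputs are excluded by Pre_
    | some word =>
      let rid : Int := match PySem.List.pyGet? ann (-1) with
        | none => 0                                                   -- if not ann: 0
        | some t0 => t0.1 + (if rc.1 ≠ t0.2.2.1 then 1 else 0)        -- ann[-1][0] + (r != ann[-1][2][0])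
      ann ++ [(rid, word, (rc.1, rc.2))]

-- Stage 2: per distinct word, support = |{run ids of its occurrences}|, positions by filtering.
def mine_proj_db_alt (db : List (List String)) (index_list : List (Int × Int)) (prefix_ : String) (minsup : Int) : List (String × (List (Int × Int)) × Int) :=
  let ann := index_list.foldl (pvAnnStep db) []
  let words := PySem.List.dedup (ann.map (fun t => t.2.1))            -- dict.fromkeys(t[1] for t in ann)
  (words.foldl (fun out w =>
      let support : Int := (PySem.Set.ofList ((ann.filter (fun t => t.2.1 == w)).map (fun t => t.1))).length
      if minsup ≤ support then
        out.insert (prefix_ ++ ";" ++ w) (((ann.filter (fun t => t.2.1 == w)).map (fun t => t.2.2)), support)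
      else out)
    (PySem.Dict.empty : PySem.Dict String ((List (Int × Int)) × Int))).items

-- ===== PRECONDITION & SPEC =====
-- Pre_ excludes exactly the inputs on which Python A raises IndexError: an index pair whose row
-- passes the `row >= len(db)` guard but wraps below -len(db), or whose column passes the
-- `col >= len(db[row])` guard but wraps below -len(db[row]).
def Pre_mine_proj_db (db : List (List String)) (index_list : List (Int × Int)) (prefix_ : String) (minsup : Int) : Prop :=
  (index_list.all (fun rc =>
    decide ((db.length : Int) ≤ rc.1) ||
    (decide (-(db.length : Int) ≤ rc.1) &&
      (PySem.List.pyGet? db rc.1).all (fun rowL =>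
        decide ((rowL.length : Int) ≤ rc.2) || decide (-(rowL.length : Int) ≤ rc.2))))) = true
instance (db : List (List String)) (index_list : List (Int × Int)) (prefix_ : String) (minsup : Int) : Decidable (Pre_mine_proj_db db index_list prefix_ minsup) := by unfold Pre_mine_proj_db; infer_instance

def pvWitness_mine_proj_db : List (List String) × (List (Int × Int)) × String × Int :=
  ([["a", "b"], ["a"]], [(0, 0), (0, 1), (1, 0), (-1, 0), (0, -2), (7, 3)], "p", 1)

def Spec_mine_proj_db (db : List (List String)) (index_list : List (Int × Int)) (prefix_ : String) (minsup : Int) (out : List (String × (List (Int × Int)) × Int)) : Prop := out = mine_proj_db_alt db index_list prefix_ minsup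
instance (db : List (List String)) (index_list : List (Int × Int)) (prefix_ : String) (minsup : Int) (out : List (String × (List (Int × Int)) × Int)) : Decidable (Spec_mine_proj_db db index_list prefix_ minsup out) := by unfold Spec_mine_proj_db; infer_instance

-- ===== CLAIM (what is proved, stated in full; the proofs are below) =====
def Claim_equal_mine_proj_db : Prop := ∀ (db : List (List String)) (index_list : List (Int × Int)) (prefix_ : String) (minsup : Int), Dom_mine_proj_db db index_list prefix_ minsup → Pre_mine_proj_db db index_list prefix_ minsup → Spec_mine_proj_db db index_list prefix_ minsup (mine_proj_db db index_list prefix_ minsup)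

-- ===== LEMMAS AND PROOFS =====

theorem pvWitness_ok :
    Dom_mine_proj_db pvWitness_mine_proj_db.1 pvWitness_mine_proj_db.2.1 pvWitness_mine_proj_db.2.2.1 pvWitness_mine_proj_db.2.2.2 ∧
    Pre_mine_proj_db pvWitness_mine_proj_db.1 pvWitness_mine_proj_db.2.1 pvWitness_mine_proj_db.2.2.1 pvWitness_mine_proj_db.2.2.2 := by
  decide

-- the stream of valid occurrences (r, c, word) both loops actually process
def pvValid (db : List (List String)) (index_list : List (Int × Int)) : List (Int × Int × String) :=
  index_list.flatMap (fun rc =>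
    if (db.length : Int) ≤ rc.1 then [] else
    match PySem.List.pyGet? db rc.1 with
    | none => []
    | some rowL =>
      if (rowL.length : Int) ≤ rc.2 then [] else
      match PySem.List.pyGet? rowL rc.2 with
      | none => []
      | some w => [(rc.1, rc.2, w)])

-- A's loop body restricted to the valid stream, split into its two independent sub-states
def pvCnt (s : PySem.Dict String Int × Int × PySem.Set String) (t : Int × Int × String) :
    PySem.Dict String Int × Int × PySem.Set String :=
  let seen' := if t.1 ≠ s.2.1 then PySem.Set.empty else s.2.2
  if PySem.Set.contains seen' t.2.2 then (s.1, t.1, seen')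
  else (s.1.modify t.2.2 0 (· + 1), t.1, PySem.Set.add seen' t.2.2)

def pvPStep (pos : PySem.Dict String (List (Int × Int))) (t : Int × Int × String) :
    PySem.Dict String (List (Int × Int)) :=
  pos.modify t.2.2 [] (· ++ [(t.1, t.2.1)])

def pvG (st : PySem.Dict String (List (Int × Int)) × PySem.Dict String Int × Int × PySem.Set String)
    (t : Int × Int × String) :
    PySem.Dict String (List (Int × Int)) × PySem.Dict String Int × Int × PySem.Set String :=
  (pvPStep st.1 t, pvCnt st.2 t)

theorem pvModify_eq_insert {κ ν : Type} [BEq κ] (d : PySem.Dict κ ν) (k : κ) (d0 : ν) (f : ν → ν) :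
    d.modify k d0 f = d.insert k (f (d.getD k d0)) := rfl

theorem pvStepA_eq (db : List (List String)) (st : _) (rc : Int × Int) :
    pvAStep db st rc =
      ((pvValid db [rc]).foldl pvG st) := by
  simp only [pvValid, List.flatMap_cons, List.flatMap_nil, List.append_nil]
  unfold pvAStep
  by_cases h1 : (db.length : Int) ≤ rc.1
  · simp [h1]
  · simp only [h1, if_false]
    cases hg : PySem.List.pyGet? db rc.1 with
    | none => simp
    | some rowL =>
      by_cases h2 : (rowL.length : Int) ≤ rc.2
      · simp [h2]
      · simp only [h2, if_false]
        cases hw : PySem.List.pyGet? rowL rc.2 with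
        | none => simp
        | some word =>
          simp only [List.foldl_cons, List.foldl_nil, pvG, pvPStep, pvCnt]
          have hpos : (if st.1.contains word then st.1.modify word [] (· ++ [(rc.1, rc.2)])
              else st.1.insert word [(rc.1, rc.2)]) = st.1.modify word [] (· ++ [(rc.1, rc.2)]) := by
            by_cases hc : st.1.contains word
            · simp [hc]
            · simp [hc, pvModify_eq_insert, PySem.Dict.getD_of_not_contains]
          have hcnt : ∀ cnt : PySem.Dict String Int,
              (if cnt.contains word then cnt.insert word (cnt.getD word 0 + 1)
               else cnt.insert word 1) = cnt.modify word 0 (· + 1) := by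
            intro cnt; by_cases hc : cnt.contains word
            · simp [hc, pvModify_eq_insert]
            · simp [hc, pvModify_eq_insert, PySem.Dict.getD_of_not_contains]
          by_cases hp : rc.1 = st.2.2.1 <;> by_cases hs : word ∈ st.2.2.2 <;>
            simp [hp, hs, pvModify_eq_insert, PySem.Set.empty] <;>
            first
              | (constructor <;> (intro h; rw [PySem.Dict.getD_of_not_contains _ _ h]; simp))
              | (intro h; rw [PySem.Dict.getD_of_not_contains _ _ h]; simp)

theorem pvFoldA_eq (db : List (List String)) (l : List (Int × Int)) (st : _) :
    l.foldl (pvAStep db) st = (pvValid db l).foldl pvG st := by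
  induction l generalizing st with
  | nil => rfl
  | cons rc l ih =>
    have h : pvValid db (rc :: l) = pvValid db [rc] ++ pvValid db l := by
      simp [pvValid]
    rw [List.foldl_cons, h, List.foldl_append, ← pvStepA_eq, ih]

theorem pvFold_fst (V : List (Int × Int × String)) (st : _) :
    (V.foldl pvG st).1 = V.foldl pvPStep st.1 := by
  induction V generalizing st with
  | nil => rfl
  | cons t V ih => simpa using ih _

theorem pvFold_snd (V : List (Int × Int × String)) (st : _) :
    (V.foldl pvG st).2 = V.foldl pvCnt st.2 := by
  induction V generalizing st with
  | nil => rfl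
  | cons t V ih => simpa using ih _

-- run decomposition of A's counting loop
def pvCountRuns : List (Int × Int × String) → PySem.Dict String Int → PySem.Dict String Int
  | [], cnt => cnt
  | t :: rest, cnt =>
    let run := t :: rest.takeWhile (fun u => u.1 == t.1)
    let cnt' := (PySem.List.dedup (run.map (fun u => u.2.2))).foldl
        (fun c w => c.modify w 0 (· + 1)) cnt
    pvCountRuns (rest.dropWhile (fun u => u.1 == t.1)) cnt'
termination_by l _ => l.length
decreasing_by
  simp only [List.length_cons]
  exact Nat.lt_succ_of_le (List.length_dropWhile_le _ _)

-- ordered dedup relative to an already-seen set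
def pvDedupFrom (s : PySem.Set String) : List String → List String
  | [] => []
  | w :: ws => if PySem.Set.contains s w then pvDedupFrom s ws
               else w :: pvDedupFrom (PySem.Set.add s w) ws

theorem pvUpdate_eq (ws : List String) (s : PySem.Set String) :
    PySem.Set.update s ws = s ++ pvDedupFrom s ws := by
  induction ws generalizing s with
  | nil => simp [PySem.Set.update, pvDedupFrom]
  | cons w ws ih =>
    rw [PySem.Set.update_cons, pvDedupFrom]
    by_cases h : w ∈ s
    · have hc : PySem.Set.contains s w = true := (PySem.Set.contains_iff s w).mpr h
      rw [PySem.Set.add_of_mem h, ih, if_pos hc]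
    · rw [PySem.Set.add_of_not_mem h, ih, if_neg (by simp [h])]
      simp

theorem pvDedupFrom_empty (ws : List String) :
    pvDedupFrom PySem.Set.empty ws = PySem.List.dedup ws := by
  rw [PySem.List.dedup_eq_ofList, ← PySem.Set.update_nil_left, pvUpdate_eq]
  rfl

theorem pvRun_fold (run : List (Int × Int × String)) (r : Int)
    (h : ∀ u ∈ run, u.1 = r) (cnt : PySem.Dict String Int) (s : PySem.Set String) :
    run.foldl pvCnt (cnt, r, s) =
      ((pvDedupFrom s (run.map (fun u => u.2.2))).foldl (fun c w => c.modify w 0 (· + 1)) cnt,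
       r, PySem.Set.update s (run.map (fun u => u.2.2))) := by
  induction run generalizing cnt s with
  | nil => simp [pvDedupFrom, PySem.Set.update]
  | cons u run ih =>
    have hu : u.1 = r := h u (by simp)
    have hrest : ∀ v ∈ run, v.1 = r := fun v hv => h v (by simp [hv])
    have step : pvCnt (cnt, r, s) u =
        (if PySem.Set.contains s u.2.2 then (cnt, r, s)
         else (cnt.modify u.2.2 0 (· + 1), r, PySem.Set.add s u.2.2)) := by
      simp [pvCnt, hu]
    rw [List.foldl_cons, step]
    by_cases hs : u.2.2 ∈ s
    · have hc : PySem.Set.contains s u.2.2 = true := (PySem.Set.contains_iff _ _).mpr hs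
      rw [if_pos hc, ih hrest]
      simp [pvDedupFrom, hs, PySem.Set.update_cons]
    · rw [if_neg (by simp [hs]), ih hrest]
      simp [pvDedupFrom, hs, PySem.Set.update_cons]

theorem pvCnt_prev_indep (cnt : PySem.Dict String Int) (p q : Int) (t : Int × Int × String) :
    pvCnt (cnt, p, PySem.Set.empty) t = pvCnt (cnt, q, PySem.Set.empty) t := by
  simp only [pvCnt, PySem.Set.empty]
  split_ifs <;> simp [PySem.Set.contains] at *

theorem pvCnt_reset (cnt : PySem.Dict String Int) (r : Int) (s : PySem.Set String)
    (t : Int × Int × String) (h : t.1 ≠ r) :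
    pvCnt (cnt, r, s) t = pvCnt (cnt, r, PySem.Set.empty) t := by
  simp [pvCnt, h]

theorem pvDropWhile_head {α : Type} (p : α → Bool) (l : List α) (u : α) (tail : List α)
    (h : l.dropWhile p = u :: tail) : p u = false := by
  induction l with
  | nil => simp at h
  | cons a l ih =>
    rw [List.dropWhile_cons] at h
    by_cases hp : p a
    · exact ih (by simpa [hp] using h)
    · have ha : a = u := by
        simp [hp] at h
        exact h.1
      subst ha
      simpa using hp

theorem pvCount_main (V : List (Int × Int × String)) (cnt : PySem.Dict String Int) (p : Int) :
    (V.foldl pvCnt (cnt, p, PySem.Set.empty)).1 = pvCountRuns V cnt := by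
  induction V, cnt using pvCountRuns.induct generalizing p with
  | case1 cnt => simp [pvCountRuns]
  | case2 t rest cnt run cnt' ih =>
    have hrows : ∀ u ∈ t :: rest.takeWhile (fun u => u.1 == t.1), u.1 = t.1 := by
      intro u hu
      rcases List.mem_cons.mp hu with h | h
      · rw [h]
      · have hb := List.mem_takeWhile_imp h
        exact eq_of_beq hb
    have hV : t :: rest =
        (t :: rest.takeWhile (fun u => u.1 == t.1)) ++ rest.dropWhile (fun u => u.1 == t.1) := by
      simp [List.takeWhile_append_dropWhile]
    have h1 : (t :: rest.takeWhile (fun u => u.1 == t.1)).foldl pvCnt (cnt, p, PySem.Set.empty)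
        = (t :: rest.takeWhile (fun u => u.1 == t.1)).foldl pvCnt (cnt, t.1, PySem.Set.empty) := by
      simp only [List.foldl_cons]
      rw [pvCnt_prev_indep cnt p t.1 t]
    rw [pvCountRuns.eq_2]
    conv_lhs => rw [hV]
    rw [List.foldl_append, h1, pvRun_fold _ t.1 hrows cnt PySem.Set.empty, pvDedupFrom_empty]
    cases hre : rest.dropWhile (fun u => u.1 == t.1) with
    | nil =>
      rw [pvCountRuns.eq_1]
      rfl
    | cons u tail =>
      have hu1 : u.1 ≠ t.1 := by
        have := pvDropWhile_head _ _ _ _ hre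
        simpa using this
      rw [List.foldl_cons, pvCnt_reset _ _ _ _ hu1, ← List.foldl_cons]
      have h2 := ih t.1
      rw [hre] at h2
      exact h2

-- ===== B-side characterization: explicit run-id annotation of the valid stream =====

-- annotation continuing after a previous valid entry of row R with run id I
def pvAnnC : List (Int × Int × String) → Int → Int → List (Int × String × (Int × Int))
  | [], _, _ => []
  | t :: rest, R, I =>
    let rid := if t.1 = R then I else I + 1
    (rid, t.2.2, (t.1, t.2.1)) :: pvAnnC rest t.1 rid

-- annotation of a stream whose first entry starts a fresh run with id I
def pvAnnFresh : List (Int × Int × String) → Int → List (Int × String × (Int × Int))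
  | [], _ => []
  | t :: rest, I => (I, t.2.2, (t.1, t.2.1)) :: pvAnnC rest t.1 I

-- the accumulator step of B's stage-1 loop on the valid stream
def pvAnnAcc (ann : List (Int × String × (Int × Int))) (t : Int × Int × String) :
    List (Int × String × (Int × Int)) :=
  let rid : Int := match PySem.List.pyGet? ann (-1) with
    | none => 0
    | some t0 => t0.1 + (if t.1 ≠ t0.2.2.1 then 1 else 0)
  ann ++ [(rid, t.2.2, (t.1, t.2.1))]

theorem pvAnnStep_eq (db : List (List String)) (ann : List (Int × String × (Int × Int)))
    (rc : Int × Int) :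
    pvAnnStep db ann rc = (pvValid db [rc]).foldl pvAnnAcc ann := by
  simp only [pvValid, List.flatMap_cons, List.flatMap_nil, List.append_nil]
  unfold pvAnnStep
  by_cases h1 : (db.length : Int) ≤ rc.1
  · simp [h1]
  · simp only [h1, if_false]
    cases hg : PySem.List.pyGet? db rc.1 with
    | none => simp
    | some rowL =>
      by_cases h2 : (rowL.length : Int) ≤ rc.2
      · simp [h2]
      · simp only [h2, if_false]
        cases hw : PySem.List.pyGet? rowL rc.2 with
        | none => simp
        | some word => simp [pvAnnAcc]

theorem pvFoldAnn_eq (db : List (List String)) (l : List (Int × Int))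
    (ann : List (Int × String × (Int × Int))) :
    l.foldl (pvAnnStep db) ann = (pvValid db l).foldl pvAnnAcc ann := by
  induction l generalizing ann with
  | nil => rfl
  | cons rc l ih =>
    have h : pvValid db (rc :: l) = pvValid db [rc] ++ pvValid db l := by
      simp [pvValid]
    rw [List.foldl_cons, h, List.foldl_append, ← pvAnnStep_eq, ih]

theorem pvAnnAcc_concat (V : List (Int × Int × String))
    (acc : List (Int × String × (Int × Int))) (t0 : Int × String × (Int × Int)) :
    V.foldl pvAnnAcc (acc ++ [t0]) = acc ++ [t0] ++ pvAnnC V t0.2.2.1 t0.1 := by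
  induction V generalizing acc t0 with
  | nil => simp [pvAnnC]
  | cons u rest ih =>
    rw [List.foldl_cons]
    have hstep : pvAnnAcc (acc ++ [t0]) u =
        (acc ++ [t0]) ++ [((if u.1 = t0.2.2.1 then t0.1 else t0.1 + 1), u.2.2, (u.1, u.2.1))] := by
      simp only [pvAnnAcc, PySem.List.pyGet?_neg_one, List.getLast?_concat]
      by_cases h : u.1 = t0.2.2.1 <;> simp [h]
    rw [hstep, ih]
    by_cases h : u.1 = t0.2.2.1 <;> simp [pvAnnC, h]

theorem pvAnn_eq (V : List (Int × Int × String)) :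
    V.foldl pvAnnAcc [] = pvAnnFresh V 0 := by
  cases V with
  | nil => rfl
  | cons t rest =>
    rw [List.foldl_cons]
    have hstep : pvAnnAcc [] t = [] ++ [((0 : Int), t.2.2, (t.1, t.2.1))] := by
      simp [pvAnnAcc, PySem.List.pyGet?_neg_one]
    rw [hstep, pvAnnAcc_concat]
    simp [pvAnnFresh]

-- a run of constant row R continues with the same run id
theorem pvAnnC_append_run (xs rest : List (Int × Int × String)) (R : Int) (I : Int)
    (h : ∀ u ∈ xs, u.1 = R) :
    pvAnnC (xs ++ rest) R I = xs.map (fun u => (I, u.2.2, (u.1, u.2.1))) ++ pvAnnC rest R I := by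
  induction xs with
  | nil => simp
  | cons x xs ih =>
    have hx : x.1 = R := h x (by simp)
    have hxs : ∀ u ∈ xs, u.1 = R := fun u hu => h u (by simp [hu])
    simp only [List.cons_append, pvAnnC, List.map_cons]
    rw [if_pos hx, hx, ih hxs]

-- after a row change the continuation is a fresh annotation with the next id
theorem pvAnnC_fresh (V : List (Int × Int × String)) (R : Int) (I : Int)
    (h : ∀ u ∈ V.head?, u.1 ≠ R) :
    pvAnnC V R I = pvAnnFresh V (I + 1) := by
  cases V with
  | nil => rfl
  | cons u rest =>
    have hu : u.1 ≠ R := h u (by simp)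
    simp [pvAnnC, pvAnnFresh, hu]

theorem pvAnnC_rid_le (V : List (Int × Int × String)) (R : Int) (I : Int)
    (x : Int × String × (Int × Int)) (hx : x ∈ pvAnnC V R I) : I ≤ x.1 := by
  induction V generalizing R I with
  | nil => simp [pvAnnC] at hx
  | cons u rest ih =>
    simp only [pvAnnC, List.mem_cons] at hx
    rcases hx with h | h
    · subst h
      by_cases hr : u.1 = R <;> simp [hr]
    · have := ih u.1 _ h
      by_cases hr : u.1 = R
      · simpa [hr] using this
      · simp only [if_neg hr] at this
        omega

theorem pvAnnFresh_rid_le (V : List (Int × Int × String)) (I : Int)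
    (x : Int × String × (Int × Int)) (hx : x ∈ pvAnnFresh V I) : I ≤ x.1 := by
  cases V with
  | nil => simp [pvAnnFresh] at hx
  | cons t rest =>
    simp only [pvAnnFresh, List.mem_cons] at hx
    rcases hx with h | h
    · subst h; simp
    · exact pvAnnC_rid_le rest t.1 I x h

-- words of the annotation are the words of the valid stream, in order
theorem pvAnnC_words (V : List (Int × Int × String)) (R : Int) (I : Int) :
    (pvAnnC V R I).map (fun t => t.2.1) = V.map (fun t => t.2.2) := by
  induction V generalizing R I with
  | nil => rfl
  | cons u rest ih => simp [pvAnnC, ih]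

theorem pvAnnFresh_words (V : List (Int × Int × String)) (I : Int) :
    (pvAnnFresh V I).map (fun t => t.2.1) = V.map (fun t => t.2.2) := by
  cases V with
  | nil => rfl
  | cons t rest => simp [pvAnnFresh, pvAnnC_words]

-- positions of a word in the annotation = its positions in the valid stream
theorem pvAnnC_pos (V : List (Int × Int × String)) (R : Int) (I : Int) (w : String) :
    ((pvAnnC V R I).filter (fun t => t.2.1 == w)).map (fun t => t.2.2)
      = (V.filter (fun t => t.2.2 == w)).map (fun t => (t.1, t.2.1)) := by
  induction V generalizing R I with
  | nil => rfl
  | cons u rest ih =>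
    simp only [pvAnnC, List.filter_cons]
    by_cases hw : u.2.2 = w
    · simp [hw, ih]
    · simp [hw, ih]

theorem pvAnnFresh_pos (V : List (Int × Int × String)) (I : Int) (w : String) :
    ((pvAnnFresh V I).filter (fun t => t.2.1 == w)).map (fun t => t.2.2)
      = (V.filter (fun t => t.2.2 == w)).map (fun t => (t.1, t.2.1)) := by
  cases V with
  | nil => rfl
  | cons t rest =>
    simp only [pvAnnFresh, List.filter_cons]
    by_cases hw : t.2.2 = w
    · simp [hw, pvAnnC_pos]
    · simp [hw, pvAnnC_pos]

-- |set(c ++ L)| = 1 + |set(L)| when c is a nonempty constant-I list and I ∉ L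
theorem pvOfList_const (I : Int) (xs : List Int) (h : ∀ x ∈ xs, x = I) :
    PySem.Set.update [I] xs = [I] := by
  induction xs with
  | nil => rfl
  | cons x xs ih =>
    have hx : x = I := h x (by simp)
    rw [PySem.Set.update_cons, hx, PySem.Set.add_of_mem (by simp)]
    exact ih (fun y hy => h y (by simp [hy]))

theorem pvSet_len_cons_run (xs L : List Int) (I : Int)
    (hxs : ∀ x ∈ xs, x = I) (hne : xs ≠ []) (hL : I ∉ L) :
    (PySem.Set.ofList (xs ++ L)).length = 1 + (PySem.Set.ofList L).length := by
  have hxsOf : PySem.Set.ofList xs = [I] := by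
    cases xs with
    | nil => exact absurd rfl hne
    | cons x xs =>
      have hx : x = I := hxs x (by simp)
      have : PySem.Set.ofList (x :: xs) = PySem.Set.update [x] xs := by
        rw [← PySem.Set.update_nil_left, PySem.Set.update_cons]
        rfl
      rw [this, hx, pvOfList_const I xs (fun y hy => hxs y (by simp [hy]))]
  rw [PySem.Set.ofList_append, hxsOf, PySem.Set.update_eq_append_filter]
  have hfilter : (PySem.Set.ofList L).filter (fun y => !(PySem.Set.contains [I] y)) =
      PySem.Set.ofList L := by
    apply List.filter_eq_self.mpr
    intro y hy
    have hyL : y ∈ L := (PySem.Set.mem_ofList L y).mp hy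
    have : y ≠ I := fun he => hL (he ▸ hyL)
    simp [PySem.Set.contains, this]
  rw [hfilter]
  simp [Nat.add_comm]

-- dedup is transparent to Set.update
theorem pvUpdate_dedup (s : PySem.Set String) (ws : List String) :
    PySem.Set.update s (PySem.List.dedup ws) = PySem.Set.update s ws := by
  rw [PySem.Set.update_eq_append_filter, PySem.Set.update_eq_append_filter,
    PySem.List.dedup_eq_ofList, PySem.Set.ofList_ofList]

-- keys of A's count dict = distinct words of the valid stream in first-occurrence order
theorem pvCountRuns_keys (V : List (Int × Int × String)) (cnt : PySem.Dict String Int) :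
    (pvCountRuns V cnt).keys = PySem.Set.update cnt.keys (V.map (fun t => t.2.2)) := by
  induction V, cnt using pvCountRuns.induct with
  | case1 cnt => simp [pvCountRuns, PySem.Set.update]
  | case2 t rest cnt run cnt' ih =>
    rw [pvCountRuns.eq_2]
    rw [ih]
    show PySem.Set.update ((List.foldl (fun c w => c.modify w 0 (· + 1)) cnt
        (PySem.List.dedup ((t :: rest.takeWhile (fun u => u.1 == t.1)).map (fun u => u.2.2)))).keys) _ = _
    rw [PySem.Dict.keys_foldl_modify _ _ (fun _ _ v => v + 1), pvUpdate_dedup,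
      ← PySem.Set.update_append, ← List.map_append]
    congr 1
    simp [List.takeWhile_append_dropWhile]

-- A's count of w = number of distinct run ids under which w occurs in the annotation
theorem pvCountRuns_getD (V : List (Int × Int × String)) (cnt : PySem.Dict String Int)
    (I : Int) (w : String) :
    (pvCountRuns V cnt).getD w 0 = cnt.getD w 0 +
      ((PySem.Set.ofList (((pvAnnFresh V I).filter (fun t => t.2.1 == w)).map (fun t => t.1))).length : Int) := by
  induction V, cnt using pvCountRuns.induct generalizing I with
  | case1 cnt => simp [pvCountRuns, pvAnnFresh, PySem.Set.ofList]
  | case2 t rest cnt run cnt' ih =>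
    rw [pvCountRuns.eq_2]
    have hrows : ∀ u ∈ t :: rest.takeWhile (fun u => u.1 == t.1), u.1 = t.1 := by
      intro u hu
      rcases List.mem_cons.mp hu with h | h
      · rw [h]
      · have hb := List.mem_takeWhile_imp h
        exact eq_of_beq hb
    -- annotation splits as: the first run tagged I, then a fresh annotation with I + 1
    have hsplit : pvAnnFresh (t :: rest) I =
        (t :: rest.takeWhile (fun u => u.1 == t.1)).map (fun u => (I, u.2.2, (u.1, u.2.1))) ++
          pvAnnFresh (rest.dropWhile (fun u => u.1 == t.1)) (I + 1) := by
      have hr : rest = rest.takeWhile (fun u => u.1 == t.1) ++ rest.dropWhile (fun u => u.1 == t.1) := by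
        simp [List.takeWhile_append_dropWhile]
      have htk : ∀ u ∈ rest.takeWhile (fun u => u.1 == t.1), u.1 = t.1 := by
        intro u hu
        have hb := List.mem_takeWhile_imp hu
        exact eq_of_beq hb
      show (I, t.2.2, (t.1, t.2.1)) :: pvAnnC rest t.1 I = _
      conv_lhs => rw [hr]
      rw [pvAnnC_append_run _ _ _ _ htk]
      rw [pvAnnC_fresh _ _ _ (by
        intro u hu hne
        cases hd : rest.dropWhile (fun u => u.1 == t.1) with
        | nil => simp [hd] at hu
        | cons v tl =>
          rw [hd] at hu
          simp only [List.head?_cons, Option.mem_some_iff] at hu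
          subst hu
          have := pvDropWhile_head _ _ _ _ hd
          simp [hne] at this)]
      simp
    rw [hsplit]
    -- push the filter/map through the tagged first run
    have hfm : ((((t :: rest.takeWhile (fun u => u.1 == t.1)).map (fun u => ((I : Int), u.2.2, (u.1, u.2.1))) ++
            pvAnnFresh (rest.dropWhile (fun u => u.1 == t.1)) (I + 1)).filter
          (fun x => x.2.1 == w)).map (fun x => x.1))
        = ((t :: rest.takeWhile (fun u => u.1 == t.1)).filter (fun u => u.2.2 == w)).map (fun _ => (I : Int)) ++
          (((pvAnnFresh (rest.dropWhile (fun u => u.1 == t.1)) (I + 1)).filter (fun x => x.2.1 == w)).map (fun x => x.1)) := by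
      rw [List.filter_append, List.map_append]
      congr 1
      rw [List.filter_map, List.map_map]
      rfl
    -- getD through the run's increment fold
    have hcnt' : cnt'.getD w 0 = cnt.getD w 0 +
        ((PySem.List.dedup ((t :: rest.takeWhile (fun u => u.1 == t.1)).map (fun u => u.2.2))).count w : Int) := by
      show (List.foldl (fun c w => c.modify w 0 (· + 1)) cnt
          (PySem.List.dedup ((t :: rest.takeWhile (fun u => u.1 == t.1)).map (fun u => u.2.2)))).getD w 0 = _
      rw [PySem.Dict.getD_foldl_modify_add_one]
    rw [ih (I + 1), hcnt', hfm]
    by_cases hw : w ∈ (t :: rest.takeWhile (fun u => u.1 == t.1)).map (fun u => u.2.2)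
    · -- w occurs in the first run: the tagged block contributes the single fresh id I
      have hcount : (PySem.List.dedup ((t :: rest.takeWhile (fun u => u.1 == t.1)).map (fun u => u.2.2))).count w = 1 := by
        rw [PySem.List.dedup_eq_ofList]
        exact List.count_eq_one_of_mem (PySem.Set.nodup_ofList _) ((PySem.Set.mem_ofList _ _).mpr hw)
      have hxne : ((t :: rest.takeWhile (fun u => u.1 == t.1)).filter (fun u => u.2.2 == w)).map (fun _ => (I : Int)) ≠ [] := by
        obtain ⟨u, hu, hue⟩ := List.mem_map.mp hw
        simp only [ne_eq, List.map_eq_nil_iff, List.filter_eq_nil_iff, not_forall]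
        exact ⟨u, hu, by simp [hue]⟩
      have hnotin : (I : Int) ∉ ((pvAnnFresh (rest.dropWhile (fun u => u.1 == t.1)) (I + 1)).filter (fun x => x.2.1 == w)).map (fun x => x.1) := by
        intro hmem
        obtain ⟨x, hx, hxe⟩ := List.mem_map.mp hmem
        have := pvAnnFresh_rid_le (rest.dropWhile (fun u => u.1 == t.1)) (I + 1) x (List.mem_of_mem_filter hx)
        omega
      rw [pvSet_len_cons_run _ _ I
          (by intro x hx; obtain ⟨u, _, he⟩ := List.mem_map.mp hx; exact he.symm) hxne hnotin, hcount]
      push_cast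
      ring
    · -- w does not occur in the first run: nothing is contributed
      have hcount : (PySem.List.dedup ((t :: rest.takeWhile (fun u => u.1 == t.1)).map (fun u => u.2.2))).count w = 0 := by
        rw [PySem.List.dedup_eq_ofList, List.count_eq_zero]
        intro hmem
        exact hw ((PySem.Set.mem_ofList _ _).mp hmem)
      have hfe : (t :: rest.takeWhile (fun u => u.1 == t.1)).filter (fun u => u.2.2 == w) = [] := by
        rw [List.filter_eq_nil_iff]
        intro u hu
        simp only [beq_iff_eq]
        intro he
        exact hw (List.mem_map.mpr ⟨u, hu, he⟩)
      rw [hfe, hcount]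
      simp

-- items of B's stage-2 loop: fresh distinct keys append in order
theorem pvItems_fold (ws : List String) (key : String → String) (P : String → Prop)
    [DecidablePred P]
    (F : String → (List (Int × Int)) × Int) (d : PySem.Dict String ((List (Int × Int)) × Int))
    (hnd : (ws.map key).Nodup) (hfresh : ∀ w ∈ ws, d.contains (key w) = false) :
    (ws.foldl (fun d w => if P w then d.insert (key w) (F w) else d) d).items =
      d.items ++ (ws.filter (fun w => decide (P w))).map (fun w => (key w, F w)) := by
  induction ws generalizing d with
  | nil => simp
  | cons w ws ih =>
    simp only [List.map_cons, List.nodup_cons] at hnd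
    rw [List.foldl_cons, List.filter_cons]
    by_cases hp : P w
    · have hc : d.contains (key w) = false := hfresh w (by simp)
      have hfresh' : ∀ w' ∈ ws, (d.insert (key w) (F w)).contains (key w') = false := by
        intro w' hw'
        rw [PySem.Dict.contains_insert]
        have : key w' ≠ key w := fun he => hnd.1 (he ▸ List.mem_map_of_mem hw')
        simp [this, hfresh w' (by simp [hw'])]
      rw [if_pos hp, if_pos (by simpa using hp), ih _ hnd.2 hfresh',
        PySem.Dict.items_insert_of_not_contains _ _ hc]
      simp
    · rw [if_neg hp, if_neg (by simpa using hp), ih _ hnd.2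
        (fun w' hw' => hfresh w' (by simp [hw']))]

-- the output keys f"{prefix};{w}" are injective in w
theorem pvKeyInj (pre a b : String) (h : pre ++ ";" ++ a = pre ++ ";" ++ b) : a = b := by
  have h2 := congrArg String.toList h
  simp only [String.toList_append] at h2
  exact String.toList_inj.mp (List.append_cancel_left h2)

-- ===== VERDICT (by name: the statement is the Claim_ definition above) =====
theorem mine_proj_db_spec : Claim_equal_mine_proj_db := by
  intro db il pre ms _ _
  show mine_proj_db db il pre ms = mine_proj_db_alt db il pre ms
  have hfold := pvFoldA_eq db il (PySem.Dict.empty, PySem.Dict.empty, -1, PySem.Set.empty)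
  have hcnt : (List.foldl pvG (PySem.Dict.empty, PySem.Dict.empty, -1, PySem.Set.empty)
        (pvValid db il)).2.1 = pvCountRuns (pvValid db il) PySem.Dict.empty := by
    rw [pvFold_snd]
    exact pvCount_main _ _ _
  have hposd : (List.foldl pvG (PySem.Dict.empty, PySem.Dict.empty, -1, PySem.Set.empty)
        (pvValid db il)).1 = (pvValid db il).foldl pvPStep PySem.Dict.empty := by
    rw [pvFold_fst]
  have hann : il.foldl (pvAnnStep db) [] = pvAnnFresh (pvValid db il) 0 := by
    rw [pvFoldAnn_eq, pvAnn_eq]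
  simp only [mine_proj_db, mine_proj_db_alt]
  rw [hfold, hcnt, hposd, hann]
  -- both key lists are the distinct words of the valid stream in first-occurrence order
  have hkeys : (pvCountRuns (pvValid db il) PySem.Dict.empty).keys =
      PySem.List.dedup ((pvAnnFresh (pvValid db il) 0).map (fun t => t.2.1)) := by
    rw [pvCountRuns_keys, pvAnnFresh_words, PySem.List.dedup_eq_ofList,
      PySem.Dict.keys_empty, PySem.Set.update_nil_left]
  -- pointwise: A's count of w = B's support of w
  have hgetD : ∀ w, (pvCountRuns (pvValid db il) PySem.Dict.empty).getD w 0 =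
      ((PySem.Set.ofList (((pvAnnFresh (pvValid db il) 0).filter (fun t => t.2.1 == w)).map
          (fun t => t.1))).length : Int) := by
    intro w
    rw [pvCountRuns_getD (pvValid db il) PySem.Dict.empty 0 w, PySem.Dict.getD_empty]
    simp
  -- pointwise: A's positions of w = B's positions of w
  have hpos : ∀ w, ((pvValid db il).foldl pvPStep PySem.Dict.empty).getD w [] =
      ((pvAnnFresh (pvValid db il) 0).filter (fun t => t.2.1 == w)).map (fun t => t.2.2) := by
    intro w
    rw [pvAnnFresh_pos]
    have hshape : (pvValid db il).foldl pvPStep PySem.Dict.empty =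
        ((pvValid db il).map (fun t => (t.2.2, (t.1, t.2.1)))).foldl
          (fun d p => d.modify p.1 [] (· ++ [p.2])) PySem.Dict.empty := by
      rw [List.foldl_map]
      rfl
    rw [hshape, PySem.Dict.getD_foldl_modify_append, PySem.Dict.getD_empty, List.filter_map,
      List.map_map]
    rfl
  -- B's stage-2 loop appends exactly the frequent items in order
  have hwnd : (PySem.List.dedup ((pvAnnFresh (pvValid db il) 0).map (fun t => t.2.1))).Nodup := by
    rw [PySem.List.dedup_eq_ofList]
    exact PySem.Set.nodup_ofList _
  have hknd : ((PySem.List.dedup ((pvAnnFresh (pvValid db il) 0).map (fun t => t.2.1))).map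
      (fun w => pre ++ ";" ++ w)).Nodup := by
    refine List.Nodup.map_on ?_ hwnd
    intro a _ b _ hab
    exact pvKeyInj pre a b hab
  rw [pvItems_fold (PySem.List.dedup ((pvAnnFresh (pvValid db il) 0).map (fun t => t.2.1)))
      (fun w => pre ++ ";" ++ w)
      (fun w => ms ≤ ((PySem.Set.ofList (((pvAnnFresh (pvValid db il) 0).filter
          (fun t => t.2.1 == w)).map (fun t => t.1))).length : Int))
      (fun w => (((pvAnnFresh (pvValid db il) 0).filter (fun t => t.2.1 == w)).map (fun t => t.2.2),
        ((PySem.Set.ofList (((pvAnnFresh (pvValid db il) 0).filter (fun t => t.2.1 == w)).map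
          (fun t => t.1))).length : Int)))
      PySem.Dict.empty hknd (fun w _ => PySem.Dict.contains_empty _)]
  rw [hkeys]
  have hfilt : (fun w => decide (ms ≤ (pvCountRuns (pvValid db il) PySem.Dict.empty).getD w 0)) =
      (fun w => decide (ms ≤ ((PySem.Set.ofList (((pvAnnFresh (pvValid db il) 0).filter
          (fun t => t.2.1 == w)).map (fun t => t.1))).length : Int))) := by
    funext w
    rw [hgetD w]
  have hmap : (fun w => (pre ++ ";" ++ w,
        (((pvValid db il).foldl pvPStep PySem.Dict.empty).getD w [],
         (pvCountRuns (pvValid db il) PySem.Dict.empty).getD w 0))) =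
      (fun w => (pre ++ ";" ++ w,
        (((pvAnnFresh (pvValid db il) 0).filter (fun t => t.2.1 == w)).map (fun t => t.2.2),
         ((PySem.Set.ofList (((pvAnnFresh (pvValid db il) 0).filter (fun t => t.2.1 == w)).map
            (fun t => t.1))).length : Int)))) := by
    funext w
    rw [hgetD w, hpos w]
  rw [hfilt, hmap]
  rw [show (PySem.Dict.empty : PySem.Dict String ((List (Int × Int)) × Int)).items = [] from rfl]
  simp
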